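-- pv_equiv track=rewrite | github.com/mstrakl/inav | tools/msp_debug.py | crc8_dvb_s2_update
-- ===== SOURCE A (Python) =====
-- POLY = 0xD5
--
-- def crc8_dvb_s2_update(crc, b):
--     crc ^= b
--     for _ in range(8):
--         if crc & 0x80:
--             crc = ((crc << 1) ^ POLY) & 0xFF
--         else:
--             crc = (crc << 1) & 0xFF
--     return crc
-- ===== SOURCE B (Python) =====
-- POLY = 0xD5
--
--
-- def _crc8_byte(i):
--     c = i
--     for _ in range(8):
--         if c & 0x80:
--             c = ((c << 1) ^ POLY) & 0xFF
--         else: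
--             c = (c << 1) & 0xFF
--     return c
--
--
-- CRC_TABLE = [_crc8_byte(i) for i in range(256)]
--
--
-- def crc8_dvb_s2_update(crc, b):
--     return CRC_TABLE[(crc ^ b) & 0xFF]
-- ===== Notes on version B (the rewrite author's own statement) =====
-- stated objective: faster
-- what changed: Replaced the per-call 8-iteration per-bit loop by a 256-entry table precomputed once at module load and a single masked lookup CRC_TABLE[(crc ^ b) & 0xFF].
import Mathlib
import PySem

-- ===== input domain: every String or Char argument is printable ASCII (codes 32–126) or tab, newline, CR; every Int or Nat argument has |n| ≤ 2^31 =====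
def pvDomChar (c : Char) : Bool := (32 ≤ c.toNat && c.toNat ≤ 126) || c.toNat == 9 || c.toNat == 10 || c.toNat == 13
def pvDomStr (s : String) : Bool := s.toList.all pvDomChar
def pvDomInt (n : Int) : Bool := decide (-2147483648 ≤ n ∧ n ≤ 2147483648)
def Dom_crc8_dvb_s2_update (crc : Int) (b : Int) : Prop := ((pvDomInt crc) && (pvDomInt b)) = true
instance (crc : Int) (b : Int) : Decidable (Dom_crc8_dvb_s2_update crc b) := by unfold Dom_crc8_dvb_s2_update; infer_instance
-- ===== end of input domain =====

-- B replaces A's 8-iteration per-bit loop by a single lookup into a 256-entry table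
-- precomputed at module load (objective: constant-factor speedup of the per-call path).

-- ===== PORT A =====
def pvPOLY : Int := 213  -- POLY = 0xD5

-- A: crc ^= b; then 8 rounds of the per-bit update.
def crc8_dvb_s2_update (crc : Int) (b : Int) : Int :=
  let crc := PySem.Int.bxor crc b
  (List.range 8).foldl (fun c _ =>
    if PySem.Int.band c 128 ≠ 0 then
      PySem.Int.band (PySem.Int.bxor (c <<< (1 : Nat)) pvPOLY) 255
    else
      PySem.Int.band (c <<< (1 : Nat)) 255) crc

-- ===== PORT B =====
-- _crc8_byte(i): the per-bit CRC of a single byte value i (runs once per table entry).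
def pvCrc8Byte (i : Int) : Int :=
  (List.range 8).foldl (fun c _ =>
    if PySem.Int.band c 128 ≠ 0 then
      PySem.Int.band (PySem.Int.bxor (c <<< (1 : Nat)) pvPOLY) 255
    else
      PySem.Int.band (c <<< (1 : Nat)) 255) i

-- CRC_TABLE = [_crc8_byte(i) for i in range(256)]
def pvCRC_TABLE : List Int := (PySem.List.pyRange 0 256 1).map pvCrc8Byte

-- return CRC_TABLE[(crc ^ b) & 0xFF]  (the index is provably in [0,256), so the
-- default of pyGetD is never used; Python B never raises here)
def crc8_dvb_s2_update_alt (crc : Int) (b : Int) : Int :=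
  PySem.List.pyGetD pvCRC_TABLE (PySem.Int.band (PySem.Int.bxor crc b) 255) 0

-- ===== PRECONDITION & SPEC =====
def Spec_crc8_dvb_s2_update (crc : Int) (b : Int) (out : Int) : Prop := out = crc8_dvb_s2_update_alt crc b
instance (crc : Int) (b : Int) (out : Int) : Decidable (Spec_crc8_dvb_s2_update crc b out) := by unfold Spec_crc8_dvb_s2_update; infer_instance

-- ===== CLAIM (what is proved, stated in full; the proofs are below) =====
def Claim_equal_crc8_dvb_s2_update : Prop := ∀ (crc : Int) (b : Int), Dom_crc8_dvb_s2_update crc b → Spec_crc8_dvb_s2_update crc b (crc8_dvb_s2_update crc b)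

-- ===== LEMMAS AND PROOFS =====

-- Nat-level facts ---------------------------------------------------------

theorem pvNat_and_255 (n : Nat) : n &&& 255 = n % 256 := by
  have h := Nat.and_two_pow_sub_one_eq_mod n 8
  norm_num at h
  exact h

theorem pvNat_and_128 (n : Nat) : n &&& 128 = (n % 256) &&& 128 := by
  have h1 := Nat.and_two_pow n 7
  have h2 := Nat.and_two_pow (n % 256) 7
  have h3 : (n % 256).testBit 7 = n.testBit 7 := by
    have := Nat.testBit_mod_two_pow n 8 7
    norm_num at this ⊢
    exact this
  norm_num at h1 h2
  rw [h1, h2, h3]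

theorem pvNat_xor_mod (n : Nat) : (n ^^^ 213) % 256 = ((n % 256) ^^^ 213) % 256 := by
  have : ∀ m : Nat, (m ^^^ 213) % 256 = (m ^^^ 213) &&& 255 := fun m => (pvNat_and_255 _).symm
  rw [this n, this (n % 256)]
  apply Nat.eq_of_testBit_eq
  intro i
  by_cases hi : i < 8
  · simp only [Nat.testBit_and, Nat.testBit_xor]
    have h255 : (255 : Nat).testBit i = true := by
      interval_cases i <;> decide
    have : (n % 256).testBit i = n.testBit i := by
      have := Nat.testBit_mod_two_pow n 8 i
      norm_num at this
      rw [this]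
      simp [hi]
    simp [h255, this]
  · have h255 : (255 : Nat).testBit i = false := by
      apply Nat.testBit_lt_two_pow
      calc (255 : Nat) < 2 ^ 8 := by norm_num
        _ ≤ 2 ^ i := Nat.pow_le_pow_right (by norm_num) (by omega)
    simp [Nat.testBit_and, h255]

set_option maxRecDepth 8192 in
theorem pvNat_compl_xor : ∀ r < 256, (255 - r) ^^^ 213 = 255 - (r ^^^ 213) := by decide

set_option maxRecDepth 8192 in
theorem pvNat_compl_and : ∀ r < 256, (255 - r) &&& 128 = 128 - (r &&& 128) := by decide

set_option maxRecDepth 8192 in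
theorem pvNat_xor_lt : ∀ r < 256, r ^^^ 213 < 256 := by decide

theorem pvNat_and128_le (r : Nat) : r &&& 128 ≤ 128 := by
  have := Nat.and_two_pow r 7
  norm_num at this
  rw [this]
  cases r.testBit 7 <;> simp

-- Int-level facts ---------------------------------------------------------

theorem pvInt_band_255 (x : Int) : PySem.Int.band x 255 = x % 256 := by
  unfold PySem.Int.band
  by_cases hx : 0 ≤ x
  · simp only [hx, if_true, show (0:Int) ≤ 255 by norm_num, if_true]
    have : x.toNat &&& (255 : Int).toNat = x.toNat % 256 := pvNat_and_255 _
    rw [this]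
    omega
  · simp only [hx, if_false, show (0:Int) ≤ 255 by norm_num, if_true]
    have : (255 : Int).toNat &&& (-x - 1).toNat = (-x - 1).toNat % 256 := by
      rw [Nat.land_comm]; exact pvNat_and_255 _
    rw [this]
    omega

theorem pvInt_band_128 (x : Int) : PySem.Int.band x 128 = PySem.Int.band (x % 256) 128 := by
  have hr : 0 ≤ x % 256 ∧ x % 256 < 256 := ⟨Int.emod_nonneg x (by norm_num), Int.emod_lt_of_pos x (by norm_num)⟩
  unfold PySem.Int.band
  by_cases hx : 0 ≤ x
  · simp only [hx, hr.1, if_true, show (0:Int) ≤ 128 by norm_num, if_true]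
    have h1 : x.toNat &&& 128 = (x.toNat % 256) &&& 128 := pvNat_and_128 _
    have h2 : (x % 256).toNat = x.toNat % 256 := by omega
    rw [h2]
    simp only [show (128 : Int).toNat = 128 from rfl]
    rw [h1]
  · simp only [hx, hr.1, if_false, if_true, show (0:Int) ≤ 128 by norm_num, if_true]
    set m := (-x - 1).toNat with hm
    have hx256 : (x % 256).toNat = 255 - m % 256 := by omega
    have h1 : (128 : Int).toNat &&& m = (m % 256) &&& 128 := by
      rw [show (128 : Int).toNat = 128 from rfl, Nat.land_comm]; exact pvNat_and_128 m
    have h2 : (x % 256).toNat &&& (128 : Int).toNat = 128 - ((m % 256) &&& 128) := by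
      rw [hx256, show (128 : Int).toNat = 128 from rfl]
      exact pvNat_compl_and (m % 256) (by omega)
    rw [h1, h2]
    have := pvNat_and128_le (m % 256)
    omega

-- canonical form of (a ^ 213) % 256
theorem pvInt_bxor_mod (a : Int) :
    (PySem.Int.bxor a 213) % 256 = ((a % 256).toNat ^^^ 213 : Nat) := by
  have hr : 0 ≤ a % 256 ∧ a % 256 < 256 := ⟨Int.emod_nonneg a (by norm_num), Int.emod_lt_of_pos a (by norm_num)⟩
  have hlt : ((a % 256).toNat ^^^ 213) < 256 := pvNat_xor_lt _ (by omega)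
  unfold PySem.Int.bxor
  by_cases ha : 0 ≤ a
  · simp only [ha, if_true, show (0:Int) ≤ 213 by norm_num, if_true]
    have h1 : (a.toNat ^^^ (213:Int).toNat) % 256 = (a.toNat % 256) ^^^ 213 := by
      rw [show (213 : Int).toNat = 213 from rfl]
      have := pvNat_xor_mod a.toNat
      rw [this]
      exact Nat.mod_eq_of_lt (pvNat_xor_lt _ (by omega))
    have h2 : (a % 256).toNat = a.toNat % 256 := by omega
    rw [h2]
    omega
  · simp only [ha, if_false, show (0:Int) ≤ 213 by norm_num, if_true]
    set m := (-a - 1).toNat with hm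
    have h1 : (m ^^^ (213:Int).toNat) % 256 = (m % 256) ^^^ 213 := by
      rw [show (213 : Int).toNat = 213 from rfl]
      have := pvNat_xor_mod m
      rw [this]
      exact Nat.mod_eq_of_lt (pvNat_xor_lt _ (by omega))
    have h2 : (a % 256).toNat = 255 - m % 256 := by omega
    have h3 : (255 - m % 256) ^^^ 213 = 255 - ((m % 256) ^^^ 213) := pvNat_compl_xor _ (by omega)
    have h4 : (m % 256) ^^^ 213 < 256 := pvNat_xor_lt _ (by omega)
    rw [h2, h3]
    omega

theorem pvInt_shl1 (x : Int) : x <<< (1 : Nat) = 2 * x := by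
  rw [Int.shiftLeft_eq]
  norm_num
  ring

-- one round of the loop depends only on the input mod 256
theorem pvStep_congr (x : Int) :
    (if PySem.Int.band x 128 ≠ 0 then
       PySem.Int.band (PySem.Int.bxor (x <<< (1 : Nat)) pvPOLY) 255
     else PySem.Int.band (x <<< (1 : Nat)) 255) =
    (if PySem.Int.band (x % 256) 128 ≠ 0 then
       PySem.Int.band (PySem.Int.bxor ((x % 256) <<< (1 : Nat)) pvPOLY) 255
     else PySem.Int.band ((x % 256) <<< (1 : Nat)) 255) := by
  rw [← pvInt_band_128]
  by_cases h : PySem.Int.band x 128 ≠ 0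
  · rw [if_pos h, if_pos h]
    show PySem.Int.band (PySem.Int.bxor (x <<< (1:Nat)) 213) 255 =
         PySem.Int.band (PySem.Int.bxor ((x % 256) <<< (1:Nat)) 213) 255
    rw [pvInt_band_255, pvInt_band_255, pvInt_shl1, pvInt_shl1,
        pvInt_bxor_mod, pvInt_bxor_mod]
    have : (2 * x) % 256 = (2 * (x % 256)) % 256 := by
      conv_lhs => rw [show (2 : Int) * x = 2 * (x % 256) + 256 * (2 * (x / 256)) by
        rw [Int.emod_def]; ring]
      omega
    rw [this]
  · rw [if_neg h, if_neg h]
    rw [pvInt_band_255, pvInt_band_255, pvInt_shl1, pvInt_shl1]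
    conv_lhs => rw [show (2 : Int) * x = 2 * (x % 256) + 256 * (2 * (x / 256)) by
      rw [Int.emod_def]; ring]
    omega

-- the full 8-round loop depends only on the input mod 256
theorem pvLoop_congr (x : Int) : pvCrc8Byte x = pvCrc8Byte (x % 256) := by
  show (List.range 8).foldl _ x = (List.range 8).foldl _ (x % 256)
  rw [show List.range 8 = 0 :: List.range' 1 7 from by decide]
  simp only [List.foldl_cons]
  rw [pvStep_congr]

theorem pvA_eq_byte (crc b : Int) :
    crc8_dvb_s2_update crc b = pvCrc8Byte (PySem.Int.bxor crc b) := rfl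

-- ===== VERDICT (by name: the statement is the Claim_ definition above) =====
theorem crc8_dvb_s2_update_spec : Claim_equal_crc8_dvb_s2_update := by
  intro crc b _
  unfold Spec_crc8_dvb_s2_update
  set x := PySem.Int.bxor crc b with hx
  have hr : 0 ≤ x % 256 ∧ x % 256 < 256 := ⟨Int.emod_nonneg x (by norm_num), Int.emod_lt_of_pos x (by norm_num)⟩
  have hB : crc8_dvb_s2_update_alt crc b = pvCrc8Byte (x % 256) := by
    unfold crc8_dvb_s2_update_alt pvCRC_TABLE
    rw [← hx, pvInt_band_255]
    exact PySem.List.pyGetD_map_pyRange_of_nonneg pvCrc8Byte 256 (x % 256) 0 hr.1 hr.2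
  rw [hB, pvA_eq_byte, pvLoop_congr]
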